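-- pv_equiv track=rewrite | github.com/maoluois/pythonProject | alg/lesson_6/main.1.py | GYS
-- ===== SOURCE A (Python) =====
-- def GYS(num,M,N):
--     n = 1
--     p = []
--     while n <= num:
--
--         if num % n == 0 and num//n <= M and n <= N:
--             p.append((num//n,n))
--         n += 1
--     return p
-- ===== SOURCE B (Python) =====
-- def GYS(num, M, N):
--     if num < 1:
--         return []
--     divs = set()
--     d = 1
--     while d * d <= num:
--         if num % d == 0:
--             divs.add(d)
--             divs.add(num // d)
--         d += 1
--     return [(num // n, n) for n in sorted(divs) if num // n <= M and n <= N]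
-- ===== Notes on version B (the rewrite author's own statement) =====
-- stated objective: faster
-- what changed: B enumerates divisors only up to sqrt(num) collecting both members of each divisor pair into a set, then sorts and filters, instead of A's trial of every n from 1 to num.
import Mathlib
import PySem

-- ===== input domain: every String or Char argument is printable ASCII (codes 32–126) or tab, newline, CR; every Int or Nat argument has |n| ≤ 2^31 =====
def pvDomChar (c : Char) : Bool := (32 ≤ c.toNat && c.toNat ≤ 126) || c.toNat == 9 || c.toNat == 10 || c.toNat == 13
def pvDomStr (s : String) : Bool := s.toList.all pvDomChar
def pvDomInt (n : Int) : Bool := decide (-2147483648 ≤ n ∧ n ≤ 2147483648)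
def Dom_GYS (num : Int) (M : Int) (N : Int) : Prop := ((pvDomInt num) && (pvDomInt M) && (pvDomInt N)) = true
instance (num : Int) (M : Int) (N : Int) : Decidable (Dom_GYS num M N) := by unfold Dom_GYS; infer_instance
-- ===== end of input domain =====

-- B replaces A's trial of every n from 1 to num by enumerating divisors only up to sqrt(num)
-- (collecting both members of each divisor pair into a set, then sorting and filtering): faster.


-- ===== PORT A =====
-- A: while n <= num: if num % n == 0 and num//n <= M and n <= N: p.append((num//n, n)); n += 1
def GYS (num : Int) (M : Int) (N : Int) : List (Int × Int) :=
  (PySem.List.pyRange 1 (num + 1)).foldl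
    (fun p n =>
      if PySem.Int.mod num n = 0 ∧ PySem.Int.floordiv num n ≤ M ∧ n ≤ N then
        p ++ [(PySem.Int.floordiv num n, n)]
      else p) []

-- ===== PORT B =====
-- B's while loop: d from 1 while d*d <= num, adding d and num//d to the set when d divides num.
-- fuel = num.toNat + 1 bounds the iteration count (the loop itself stops when d*d > num).
def collectDivs (num : Int) : Nat → Int → PySem.Set Int → PySem.Set Int
  | 0, _, s => s
  | fuel + 1, d, s =>
    if d * d ≤ num then
      collectDivs num fuel (d + 1)
        (if PySem.Int.mod num d = 0 then
          PySem.Set.add (PySem.Set.add s d) (PySem.Int.floordiv num d)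
        else s)
    else s

def GYS_alt (num : Int) (M : Int) (N : Int) : List (Int × Int) :=
  if num < 1 then []
  else
    ((PySem.List.sorted (collectDivs num (num.toNat + 1) 1 PySem.Set.empty) (fun x => x)).filter
        (fun n => decide (PySem.Int.floordiv num n ≤ M ∧ n ≤ N))).map
      (fun n => (PySem.Int.floordiv num n, n))

-- ===== PRECONDITION & SPEC =====
def Spec_GYS (num : Int) (M : Int) (N : Int) (out : List (Int × Int)) : Prop := out = GYS_alt num M N
instance (num : Int) (M : Int) (N : Int) (out : List (Int × Int)) : Decidable (Spec_GYS num M N out) := by unfold Spec_GYS; infer_instance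

-- ===== CLAIM (what is proved, stated in full; the proofs are below) =====
def Claim_equal_GYS : Prop := ∀ (num : Int) (M : Int) (N : Int), Dom_GYS num M N → Spec_GYS num M N (GYS num M N)

-- ===== LEMMAS AND PROOFS =====

lemma collect_nodup (num : Int) :
    ∀ (fuel : Nat) (d : Int) (s : PySem.Set Int), s.Nodup →
      (collectDivs num fuel d s).Nodup := by
  intro fuel
  induction fuel with
  | zero => intro d s hs; simpa [collectDivs] using hs
  | succ fuel ih =>
    intro d s hs
    simp only [collectDivs]
    split
    · apply ih
      split
      · exact PySem.Set.nodup_add _ _ (PySem.Set.nodup_add _ _ hs)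
      · exact hs
    · exact hs

lemma collect_mem (num : Int) :
    ∀ (fuel : Nat) (d : Int) (s : PySem.Set Int), 1 ≤ d → num + 1 - d ≤ (fuel : Int) →
      ∀ x, x ∈ collectDivs num fuel d s ↔
        x ∈ s ∨ ∃ k, d ≤ k ∧ k * k ≤ num ∧ k ∣ num ∧ (x = k ∨ x = num / k) := by
  intro fuel
  induction fuel with
  | zero =>
    intro d s hd hb x
    simp only [collectDivs, Nat.cast_zero] at *
    constructor
    · intro h; exact Or.inl h
    · rintro (h | ⟨k, hk1, hk2, _, _⟩)
      · exact h
      · exfalso; nlinarith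
  | succ fuel ih =>
    intro d s hd hb x
    simp only [collectDivs]
    split
    · rename_i hdd
      rw [ih (d + 1) _ (by omega) (by push_cast at hb ⊢; omega)]
      have hmem : x ∈ (if PySem.Int.mod num d = 0 then
          PySem.Set.add (PySem.Set.add s d) (PySem.Int.floordiv num d) else s) ↔
          x ∈ s ∨ (d ∣ num ∧ (x = d ∨ x = num / d)) := by
        split
        · rename_i hm
          rw [PySem.Int.floordiv_eq_ediv_of_pos (by omega)]
          rw [PySem.Int.mod_eq_zero_iff_dvd] at hm
          simp only [PySem.Set.mem_add, hm, true_and]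
          tauto
        · rename_i hm
          rw [PySem.Int.mod_eq_zero_iff_dvd] at hm
          simp only [hm, false_and, or_false]
      rw [hmem]
      constructor
      · rintro (( h | ⟨hdvd, hx⟩) | ⟨k, hk1, hk2, hk3, hk4⟩)
        · exact Or.inl h
        · exact Or.inr ⟨d, le_refl d, hdd, hdvd, hx⟩
        · exact Or.inr ⟨k, by omega, hk2, hk3, hk4⟩
      · rintro (h | ⟨k, hk1, hk2, hk3, hk4⟩)
        · exact Or.inl (Or.inl h)
        · rcases eq_or_lt_of_le hk1 with heq | hlt
          · exact Or.inl (Or.inr ⟨heq ▸ hk3, heq ▸ hk4⟩)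
          · exact Or.inr ⟨k, by omega, hk2, hk3, hk4⟩
    · rename_i hdd
      constructor
      · intro h; exact Or.inl h
      · rintro (h | ⟨k, hk1, hk2, _, _⟩)
        · exact h
        · exfalso; nlinarith

-- divisor-pair characterization: the set built by the sqrt-loop holds exactly the divisors of num
lemma collect_char (num : Int) (hnum : 1 ≤ num) (x : Int) :
    x ∈ collectDivs num (num.toNat + 1) 1 PySem.Set.empty ↔
      1 ≤ x ∧ x ≤ num ∧ x ∣ num := by
  rw [collect_mem num (num.toNat + 1) 1 PySem.Set.empty (le_refl 1)
      (by push_cast; omega)]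
  simp only [PySem.Set.empty, List.not_mem_nil, false_or]
  constructor
  · rintro ⟨k, hk1, hk2, hk3, hx | hx⟩
    · subst hx
      exact ⟨hk1, by nlinarith, hk3⟩
    · subst hx
      obtain ⟨c, hc⟩ := hk3
      have hkne : k ≠ 0 := by omega
      have hcdiv : num / k = c := by rw [hc, Int.mul_ediv_cancel_left _ hkne]
      rw [hcdiv]
      have hc1 : 1 ≤ c := by nlinarith
      refine ⟨hc1, by nlinarith, ⟨k, by linarith [hc]⟩⟩

  · rintro ⟨hx1, hx2, hxdvd⟩
    obtain ⟨c, hc⟩ := hxdvd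
    have hxne : x ≠ 0 := by omega
    have hc1 : 1 ≤ c := by nlinarith
    by_cases hxx : x * x ≤ num
    · exact ⟨x, hx1, hxx, ⟨c, hc⟩, Or.inl rfl⟩
    · refine ⟨c, hc1, by nlinarith, ⟨x, by linarith [hc]⟩, Or.inr ?_⟩
      have : num / c = x := by
        rw [hc, mul_comm, Int.mul_ediv_cancel_left _ (by omega)]
      omega

lemma sorted_collect (num : Int) (hnum : 1 ≤ num) :
    PySem.List.sorted (collectDivs num (num.toNat + 1) 1 PySem.Set.empty) (fun x => x)
      = (PySem.List.pyRange 1 (num + 1)).filter (fun n => decide (PySem.Int.mod num n = 0)) := by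
  apply PySem.List.sorted_eq_of_perm_of_pairwise_lt
  · apply (List.perm_ext_iff_of_nodup
      (List.Nodup.filter _ (PySem.List.nodup_pyRange_one 1 (num + 1)))
      (collect_nodup num (num.toNat + 1) 1 PySem.Set.empty List.nodup_nil)).mpr
    intro a
    rw [collect_char num hnum a]
    simp only [List.mem_filter, PySem.List.mem_pyRange_one, decide_eq_true_eq,
      PySem.Int.mod_eq_zero_iff_dvd]
    omega
  · exact List.Pairwise.filter _ (PySem.List.pairwise_lt_pyRange_one 1 (num + 1))

-- ===== VERDICT (by name: the statement is the Claim_ definition above) =====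
theorem GYS_spec : Claim_equal_GYS := by
  intro num M N _
  unfold Spec_GYS GYS GYS_alt
  by_cases hnum : num < 1
  · rw [PySem.List.pyRange_one_eq_nil (by omega)]
    simp [hnum]
  · rw [if_neg hnum]
    push Not at hnum
    have hA :
        (fun (p : List (Int × Int)) (n : Int) =>
            if PySem.Int.mod num n = 0 ∧ PySem.Int.floordiv num n ≤ M ∧ n ≤ N then
              p ++ [(PySem.Int.floordiv num n, n)]
            else p)
          = fun p n =>
            if (decide (PySem.Int.mod num n = 0) &&
                decide (PySem.Int.floordiv num n ≤ M ∧ n ≤ N)) = true then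
              p ++ [(PySem.Int.floordiv num n, n)]
            else p := by
      funext p n
      simp [Bool.decide_and]
    rw [hA, PySem.List.foldl_append_if, sorted_collect num hnum, List.filter_filter]
    simp only [Bool.and_comm, List.nil_append]
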